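-- pv_equiv track=rewrite | github.com/Lin-Chun-Yu/CMDA-Joint-NLU | Joint_model/mix/clid-mark/annotate_tp/annotate.py | annotate_words
-- ===== SOURCE A (Python) =====
-- def annotate_words(sentence, sentences, annotations):
--     words_in_sentence = sentence.split()
--     annotation_positions = [None] * len(words_in_sentence)
--
--     for sentence, annotation in zip(sentences, annotations):
--         words_to_find = sentence.split()
--         sentence_length = len(words_to_find)
--         for i in range(len(words_in_sentence) - sentence_length + 1):
--             if words_in_sentence[i:i+sentence_length] == words_to_find:
--                 for j in range(sentence_length):
--                     annotation_positions[i+j] = '0'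
--     for i, word in enumerate(annotation_positions):#空白的就標註TP
--         if word == None:  # Check if the word is already annotated
--             annotation_positions[i] = 'TP'
--
--     return annotation_positions
-- ===== SOURCE B (Python) =====
-- def annotate_words(sentence, sentences, annotations):
--     words = sentence.split()
--     n = len(words)
--     # dedupe patterns into a hash set; only the first len(annotations) sentences count
--     pats = set()
--     for s in sentences[:len(annotations)]:
--         pats.add(tuple(s.split()))
--     lengths = {len(p) for p in pats if len(p) > 0}
--     covered = [False] * n
--     for L in lengths:
--         for s in range(n - L + 1):
--             if tuple(words[s:s + L]) in pats:
--                 for j in range(s, s + L):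
--                     covered[j] = True
--     return ['0' if c else 'TP' for c in covered]
-- ===== Notes on version B (the rewrite author's own statement) =====
-- stated objective: alternative
-- what changed: A slides a window once per (sentence, annotation) pair and compares list slices; B deduplicates the split patterns into a hash set, scans once per DISTINCT positive pattern length with a set-membership test of the window, and marks a boolean coverage array, so duplicate patterns and patterns sharing a length cost a single scan.
import Mathlib
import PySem

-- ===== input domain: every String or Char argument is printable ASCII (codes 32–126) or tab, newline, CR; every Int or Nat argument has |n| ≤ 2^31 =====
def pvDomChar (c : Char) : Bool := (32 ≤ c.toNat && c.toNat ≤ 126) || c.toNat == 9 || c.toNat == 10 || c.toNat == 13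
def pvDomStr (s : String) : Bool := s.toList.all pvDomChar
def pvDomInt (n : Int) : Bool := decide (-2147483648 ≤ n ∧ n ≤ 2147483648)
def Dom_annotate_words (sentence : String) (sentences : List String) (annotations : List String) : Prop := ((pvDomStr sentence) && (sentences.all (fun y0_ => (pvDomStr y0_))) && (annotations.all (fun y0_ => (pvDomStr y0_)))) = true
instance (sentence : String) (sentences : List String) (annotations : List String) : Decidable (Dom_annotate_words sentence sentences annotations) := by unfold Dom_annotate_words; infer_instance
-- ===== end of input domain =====

-- B replaces A's per-pattern sliding scans by one scan per DISTINCT pattern length with a hash-set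
-- lookup of the window (objective: alternative — a different algorithm of similar measured cost).

-- ===== PORT A =====
-- Literal port of A: for each (sentence, annotation) pair, slide a window over the words,
-- on a slice match overwrite the covered positions with '0'; finally None -> 'TP'.
def annotate_words (sentence : String) (sentences : List String) (annotations : List String) : List String :=
  let words := PySem.Str.split₀ sentence
  let pos0 : List (Option String) := List.replicate words.length none
  let pos := (sentences.zip annotations).foldl (fun pos pa =>
      let wtf := PySem.Str.split₀ pa.1
      let m := wtf.length
      (PySem.List.pyRange 0 ((words.length : Int) - (m : Int) + 1)).foldl (fun pos s =>
        if PySem.List.slice words (some s) (some (s + (m : Int))) = wtf then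
          -- annotation_positions[i+j] = '0'; the index is always in range here
          (List.range m).foldl (fun pos (j : Nat) => PySem.List.pySetD pos (s + (j : Int)) (some "0")) pos
        else pos) pos) pos0
  pos.map (fun o => match o with | none => "TP" | some w => w)

-- ===== PORT B =====
-- Literal port of B (Source B): hash set of split patterns, set of distinct positive lengths,
-- one sliding scan per distinct length with a set-membership test, boolean coverage array.
def annotate_words_alt (sentence : String) (sentences : List String) (annotations : List String) : List String :=
  let words := PySem.Str.split₀ sentence
  let n := words.length
  let pats : PySem.Set (List String) :=
    (PySem.List.slice sentences none (some (annotations.length : Int))).foldl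
      (fun s p => PySem.Set.add s (PySem.Str.split₀ p)) PySem.Set.empty
  let lengths : PySem.Set Nat :=
    pats.foldl (fun s p => if 0 < p.length then PySem.Set.add s p.length else s) PySem.Set.empty
  let covered := lengths.foldl (fun covered (L : Nat) =>
      (PySem.List.pyRange 0 ((n : Int) - (L : Int) + 1)).foldl (fun covered s =>
        if PySem.Set.contains pats (PySem.List.slice words (some s) (some (s + (L : Int)))) then
          (PySem.List.pyRange s (s + (L : Int))).foldl (fun c j => PySem.List.pySetD c j true) covered
        else covered) covered) (List.replicate n false)
  covered.map (fun c => if c then "0" else "TP")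

-- ===== PRECONDITION & SPEC =====
def Spec_annotate_words (sentence : String) (sentences : List String) (annotations : List String) (out : List String) : Prop := out = annotate_words_alt sentence sentences annotations
instance (sentence : String) (sentences : List String) (annotations : List String) (out : List String) : Decidable (Spec_annotate_words sentence sentences annotations out) := by unfold Spec_annotate_words; infer_instance

-- ===== CLAIM (what is proved, stated in full; the proofs are below) =====
def Claim_equal_annotate_words : Prop := ∀ (sentence : String) (sentences : List String) (annotations : List String), Dom_annotate_words sentence sentences annotations → Spec_annotate_words sentence sentences annotations (annotate_words sentence sentences annotations)

-- ===== LEMMAS AND PROOFS =====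

-- position k is covered by an occurrence of pattern p found by a sliding scan (A's per-pattern loop)
abbrev pvCovA (words p : List String) (k : Nat) : Prop :=
  ∃ s ∈ PySem.List.pyRange 0 ((words.length : Int) - (p.length : Int) + 1),
    (PySem.List.slice words (some s) (some (s + (p.length : Int))) = p ∧
      s ≤ (k : Int) ∧ (k : Int) < s + p.length)

-- position k is covered by a length-L window that is a member of the pattern set (B's per-length loop)
abbrev pvCovB (words : List String) (pats : PySem.Set (List String)) (L k : Nat) : Prop :=
  ∃ s ∈ PySem.List.pyRange 0 ((words.length : Int) - (L : Int) + 1),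
    (PySem.Set.contains pats (PySem.List.slice words (some s) (some (s + (L : Int)))) = true ∧
      s ≤ (k : Int) ∧ (k : Int) < s + L)

-- marking loop: length is preserved
lemma pvMark_length {α : Type} (s : Int) (m : Nat) (v : α) (pos : List α) :
    ((List.range m).foldl (fun pos (j : Nat) => PySem.List.pySetD pos (s + (j : Int)) v) pos).length = pos.length := by
  induction m with
  | zero => simp
  | succ m ih => simp [List.range_succ, List.foldl_append, PySem.List.length_pySetD, ih]

-- marking loop: pointwise effect
lemma pvMark_getElem? {α : Type} (s : Int) (hs : 0 ≤ s) (m : Nat) (v : α) (pos : List α)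
    (hb : s.toNat + m ≤ pos.length) (k : Nat) :
    ((List.range m).foldl (fun pos (j : Nat) => PySem.List.pySetD pos (s + (j : Int)) v) pos)[k]? =
      if s ≤ (k : Int) ∧ (k : Int) < s + m then some v else pos[k]? := by
  induction m with
  | zero => rw [if_neg (by omega)]; simp
  | succ m ih =>
    have hb' : s.toNat + m ≤ pos.length := by omega
    rw [List.range_succ, List.foldl_append]
    simp only [List.foldl_cons, List.foldl_nil]
    rw [PySem.List.pySetD_of_nonneg _ _ (by omega)]
    rw [List.getElem?_set, pvMark_length, ih hb']
    split_ifs with h1 h2 h3 h4 h5 <;> first | rfl | omega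

-- sliding-scan loop: length is preserved
lemma pvScan_length {α : Type} {cond : Int → Prop} [DecidablePred cond] (m : Nat) (v : α)
    (starts : List Int) (pos : List α) :
    (starts.foldl (fun pos s =>
        if cond s then (List.range m).foldl (fun pos (j : Nat) => PySem.List.pySetD pos (s + (j : Int)) v) pos
        else pos) pos).length = pos.length := by
  induction starts generalizing pos with
  | nil => rfl
  | cons s0 rest ih =>
    rw [List.foldl_cons, ih]
    split_ifs with h
    · exact pvMark_length s0 m v pos
    · rfl

-- sliding-scan loop: pointwise effect
lemma pvScan_getElem? {α : Type} {cond : Int → Prop} [DecidablePred cond] (m : Nat) (v : α)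
    (starts : List Int) (pos : List α)
    (hs : ∀ s ∈ starts, 0 ≤ s ∧ s.toNat + m ≤ pos.length) (k : Nat) :
    (starts.foldl (fun pos s =>
        if cond s then (List.range m).foldl (fun pos (j : Nat) => PySem.List.pySetD pos (s + (j : Int)) v) pos
        else pos) pos)[k]? =
      if ∃ s ∈ starts, cond s ∧ s ≤ (k : Int) ∧ (k : Int) < s + m then some v else pos[k]? := by
  induction starts generalizing pos with
  | nil => simp
  | cons s0 rest ih =>
    obtain ⟨hs0, hb0⟩ := hs s0 (by simp)
    rw [List.foldl_cons]
    by_cases hc : cond s0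
    · rw [if_pos hc]
      rw [ih _ (fun s hmem => by
        rw [pvMark_length]; exact hs s (by simp [hmem]))]
      rw [pvMark_getElem? s0 hs0 m v pos hb0 k]
      by_cases hcover : s0 ≤ (k : Int) ∧ (k : Int) < s0 + m
      · rw [if_pos hcover]
        have hcons : ∃ s ∈ s0 :: rest, cond s ∧ s ≤ (k : Int) ∧ (k : Int) < s + m :=
          ⟨s0, by simp, hc, hcover⟩
        rw [if_pos hcons]
        split_ifs <;> rfl
      · rw [if_neg hcover]
        have hiff : (∃ s ∈ rest, cond s ∧ s ≤ (k : Int) ∧ (k : Int) < s + m) ↔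
            (∃ s ∈ s0 :: rest, cond s ∧ s ≤ (k : Int) ∧ (k : Int) < s + m) := by
          constructor
          · rintro ⟨s, hmem, h⟩; exact ⟨s, by simp [hmem], h⟩
          · rintro ⟨s, hmem, h⟩
            rcases List.mem_cons.mp hmem with rfl | hmem
            · exact absurd h.2 hcover
            · exact ⟨s, hmem, h⟩
        rw [if_congr hiff rfl rfl]
    · rw [if_neg hc]
      rw [ih _ (fun s hmem => hs s (by simp [hmem]))]
      have hiff : (∃ s ∈ rest, cond s ∧ s ≤ (k : Int) ∧ (k : Int) < s + m) ↔
          (∃ s ∈ s0 :: rest, cond s ∧ s ≤ (k : Int) ∧ (k : Int) < s + m) := by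
        constructor
        · rintro ⟨s, hmem, h⟩; exact ⟨s, by simp [hmem], h⟩
        · rintro ⟨s, hmem, h⟩
          rcases List.mem_cons.mp hmem with rfl | hmem
          · exact absurd h.1 hc
          · exact ⟨s, hmem, h⟩
      rw [if_congr hiff rfl rfl]

-- starts drawn from the sliding range are nonneg and keep the marks in range
lemma pvRange_bound (n m : Nat) (s : Int)
    (h : s ∈ PySem.List.pyRange 0 ((n : Int) - (m : Int) + 1)) : 0 ≤ s ∧ s.toNat + m ≤ n := by
  rw [PySem.List.mem_pyRange_one] at h
  omega

lemma pvRange_self (a : Int) : PySem.List.pyRange a a = [] := by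
  cases hr : PySem.List.pyRange a a with
  | nil => rfl
  | cons x xs =>
    have hx : x ∈ PySem.List.pyRange a a := by rw [hr]; simp
    rw [PySem.List.mem_pyRange_one] at hx
    omega

-- Python range(s, s+L) as a mapped List.range
lemma pvRange_add (a : Int) (m : Nat) :
    PySem.List.pyRange a (a + (m : Int)) = (List.range m).map (fun (j : Nat) => a + (j : Int)) := by
  induction m with
  | zero => simp [pvRange_self a]
  | succ m ih =>
    rw [show ((m + 1 : Nat) : Int) = (m : Int) + 1 by push_cast; ring,
      show a + ((m : Int) + 1) = (a + m) + 1 by ring,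
      PySem.List.pyRange_one_succ_right (by omega), ih, List.range_succ]
    simp

-- merging the two ifs produced by a fold step
lemma pvIf_merge {α : Type} (P Q R : Prop) [Decidable P] [Decidable Q] [Decidable R]
    (v x : α) (h : P ∨ Q ↔ R) : (if P then v else if Q then v else x) = if R then v else x := by
  split_ifs <;> tauto

-- A's outer loop over the (sentence, annotation) pairs, pointwise
lemma pvOuterA (words : List String) (pairs : List (String × String)) (pos : List (Option String))
    (hlen : pos.length = words.length) (k : Nat) :
    (pairs.foldl (fun pos pa =>
        (PySem.List.pyRange 0 ((words.length : Int) - ((PySem.Str.split₀ pa.1).length : Int) + 1)).foldl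
          (fun pos s =>
            if PySem.List.slice words (some s) (some (s + ((PySem.Str.split₀ pa.1).length : Int))) = PySem.Str.split₀ pa.1 then
              (List.range (PySem.Str.split₀ pa.1).length).foldl
                (fun pos (j : Nat) => PySem.List.pySetD pos (s + (j : Int)) (some "0")) pos
            else pos) pos) pos)[k]? =
      if ∃ pa ∈ pairs, pvCovA words (PySem.Str.split₀ pa.1) k then some (some "0") else pos[k]? := by
  induction pairs generalizing pos with
  | nil => simp
  | cons pa rest ih =>
    rw [List.foldl_cons]
    rw [ih _ (by rw [pvScan_length]; exact hlen)]
    rw [pvScan_getElem? _ _ _ _ (fun s hmem => by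
      have := pvRange_bound words.length (PySem.Str.split₀ pa.1).length s hmem
      omega) k]
    exact pvIf_merge _ _ _ _ _ (by rw [List.exists_mem_cons_iff]; exact or_comm)

-- B's outer loop over the distinct lengths, pointwise
lemma pvOuterB (words : List String) (pats : PySem.Set (List String)) (Ls : List Nat)
    (cov : List Bool) (hlen : cov.length = words.length) (k : Nat) :
    (Ls.foldl (fun covered (L : Nat) =>
        (PySem.List.pyRange 0 ((words.length : Int) - (L : Int) + 1)).foldl (fun covered s =>
          if PySem.Set.contains pats (PySem.List.slice words (some s) (some (s + (L : Int)))) then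
            (PySem.List.pyRange s (s + (L : Int))).foldl (fun c j => PySem.List.pySetD c j true) covered
          else covered) covered) cov)[k]? =
      if ∃ L ∈ Ls, pvCovB words pats L k then some true else cov[k]? := by
  induction Ls generalizing cov with
  | nil => simp
  | cons L rest ih =>
    have hstep : (fun (covered : List Bool) (s : Int) =>
        if PySem.Set.contains pats (PySem.List.slice words (some s) (some (s + (L : Int)))) then
          (PySem.List.pyRange s (s + (L : Int))).foldl (fun c j => PySem.List.pySetD c j true) covered
        else covered)
        = (fun (covered : List Bool) (s : Int) =>
        if PySem.Set.contains pats (PySem.List.slice words (some s) (some (s + (L : Int)))) then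
          (List.range L).foldl (fun c (j : Nat) => PySem.List.pySetD c (s + (j : Int)) true) covered
        else covered) := by
      funext covered s
      simp only [pvRange_add, List.foldl_map]
    rw [List.foldl_cons, hstep]
    rw [ih _ (by rw [pvScan_length]; exact hlen)]
    rw [pvScan_getElem? _ _ _ _ (fun s hmem => by
      have := pvRange_bound words.length L s hmem
      omega) k]
    exact pvIf_merge _ _ _ _ _ (by rw [List.exists_mem_cons_iff]; exact or_comm)

-- first components of zip = take
lemma pvMem_zip_fst {α β : Type} (l : List α) (l' : List β) (x : α) :
    (∃ y, (x, y) ∈ l.zip l') ↔ x ∈ l.take l'.length := by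
  induction l generalizing l' with
  | nil => simp
  | cons a rest ih =>
    cases l' with
    | nil => simp
    | cons b rest' =>
      simp only [List.zip_cons_cons, List.mem_cons, List.length_cons, List.take_succ_cons]
      constructor
      · rintro ⟨y, h | h⟩
        · left; exact congrArg Prod.fst h
        · right; exact (ih rest').mp ⟨y, h⟩
      · rintro (rfl | h)
        · exact ⟨b, Or.inl rfl⟩
        · obtain ⟨y, hy⟩ := (ih rest').mpr h
          exact ⟨y, Or.inr hy⟩

-- membership in B's pattern set
lemma pvMem_pats (sentences annotations : List String) (q : List String) :
    q ∈ ((PySem.List.slice sentences none (some ((annotations.length : Int)))).foldl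
        (fun s p => PySem.Set.add s (PySem.Str.split₀ p)) PySem.Set.empty) ↔
      ∃ x ∈ sentences.take annotations.length, PySem.Str.split₀ x = q := by
  rw [PySem.List.slice_to sentences (by positivity)]
  rw [show ((annotations.length : Int)).toNat = annotations.length from Int.toNat_natCast _]
  rw [show List.foldl (fun s p => PySem.Set.add s (PySem.Str.split₀ p)) PySem.Set.empty
        (List.take annotations.length sentences) =
      List.foldl PySem.Set.add [] ((List.take annotations.length sentences).map PySem.Str.split₀) from
    (List.foldl_map ..).symm]
  rw [← PySem.Set.ofList_eq_foldl, PySem.Set.mem_ofList]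
  simp [-List.map_take, eq_comm]

-- membership in B's length set
lemma pvMem_lengths (pats : List (List String)) (acc : PySem.Set Nat) (L : Nat) :
    L ∈ (pats.foldl (fun s p => if 0 < p.length then PySem.Set.add s p.length else s) acc) ↔
      L ∈ acc ∨ ∃ p ∈ pats, 0 < p.length ∧ p.length = L := by
  induction pats generalizing acc with
  | nil => simp
  | cons p rest ih =>
    rw [List.foldl_cons, ih]
    by_cases hp : 0 < p.length
    · rw [if_pos hp, PySem.Set.mem_add]
      constructor
      · rintro ((h | rfl) | h)
        · exact Or.inl h
        · exact Or.inr ⟨p, by simp, hp, rfl⟩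
        · obtain ⟨p', hm, h⟩ := h; exact Or.inr ⟨p', by simp [hm], h⟩
      · rintro (h | ⟨p', hm, h⟩)
        · exact Or.inl (Or.inl h)
        · rcases List.mem_cons.mp hm with rfl | hm
          · exact Or.inl (Or.inr h.2.symm)
          · exact Or.inr ⟨p', hm, h⟩
    · rw [if_neg hp]
      constructor
      · rintro (h | ⟨p', hm, h⟩)
        · exact Or.inl h
        · exact Or.inr ⟨p', by simp [hm], h⟩
      · rintro (h | ⟨p', hm, h⟩)
        · exact Or.inl h
        · rcases List.mem_cons.mp hm with rfl | hm
          · exact absurd h.1 hp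
          · exact Or.inr ⟨p', hm, h⟩

-- slice length when the window fits
lemma pvSlice_fit (words : List String) (L : Nat) (s : Int) (h0 : 0 ≤ s)
    (h : s + (L : Int) ≤ words.length) :
    (PySem.List.slice words (some s) (some (s + (L : Int)))).length = L := by
  rw [show s = ((s.toNat : Nat) : Int) from (Int.toNat_of_nonneg h0).symm]
  rw [show ((s.toNat : Nat) : Int) + (L : Int) = ((s.toNat + L : Nat) : Int) by push_cast; ring]
  rw [PySem.List.slice_natCast]
  simp
  omega

-- the bridge: A's coverage = B's coverage
lemma pvBridge (words sentences annotations : List String) (k : Nat) :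
    (∃ pa ∈ sentences.zip annotations, pvCovA words (PySem.Str.split₀ pa.1) k) ↔
      (∃ L ∈ ((((PySem.List.slice sentences none (some ((annotations.length : Int)))).foldl
                (fun s p => PySem.Set.add s (PySem.Str.split₀ p)) PySem.Set.empty)).foldl
              (fun s p => if 0 < p.length then PySem.Set.add s p.length else s) PySem.Set.empty),
        pvCovB words ((PySem.List.slice sentences none (some ((annotations.length : Int)))).foldl
            (fun s p => PySem.Set.add s (PySem.Str.split₀ p)) PySem.Set.empty) L k) := by
  constructor
  · rintro ⟨pa, hpa, s, hsmem, hslice, hcov⟩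
    have hp : PySem.Str.split₀ pa.1 ∈ ((PySem.List.slice sentences none (some ((annotations.length : Int)))).foldl
        (fun s p => PySem.Set.add s (PySem.Str.split₀ p)) PySem.Set.empty) := by
      rw [pvMem_pats]
      exact ⟨pa.1, (pvMem_zip_fst sentences annotations pa.1).mp ⟨pa.2, hpa⟩, rfl⟩
    have hpos : 0 < (PySem.Str.split₀ pa.1).length := by omega
    refine ⟨(PySem.Str.split₀ pa.1).length, ?_, s, hsmem, ?_, hcov⟩
    · rw [pvMem_lengths]
      exact Or.inr ⟨PySem.Str.split₀ pa.1, hp, hpos, rfl⟩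
    · rw [PySem.Set.contains_iff, hslice]
      exact hp
  · rintro ⟨L, _, s, hsmem, hmem, hcov⟩
    rw [PySem.Set.contains_iff, pvMem_pats] at hmem
    obtain ⟨x, hx, hsplit⟩ := hmem
    obtain ⟨y, hy⟩ := (pvMem_zip_fst sentences annotations x).mpr hx
    have hb := pvRange_bound words.length L s hsmem
    have hlenL : (PySem.Str.split₀ x).length = L := by
      rw [hsplit]; exact pvSlice_fit words L s hb.1 (by omega)
    refine ⟨(x, y), hy, s, ?_, ?_, ?_⟩
    · rw [hlenL]; exact hsmem
    · rw [hlenL, hsplit]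
    · rw [hlenL]; exact hcov

-- ===== VERDICT (by name: the statement is the Claim_ definition above) =====
theorem annotate_words_spec : Claim_equal_annotate_words := by
  intro sentence sentences annotations _dom
  unfold Spec_annotate_words annotate_words annotate_words_alt
  apply List.ext_getElem?
  intro k
  simp only [List.getElem?_map]
  rw [pvOuterA (PySem.Str.split₀ sentence) (sentences.zip annotations) _ (by simp) k]
  rw [pvOuterB (PySem.Str.split₀ sentence) _ _ _ (by simp) k]
  have hbr := pvBridge (PySem.Str.split₀ sentence) sentences annotations k
  simp only [← hbr, List.getElem?_replicate]
  split_ifs <;> rfl
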